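-- pv_equiv track=rewrite | github.com/priyagovindan/NimbleCore | NimbleCore_functions.py | getHindex_from_bincounts_lowerbound
-- ===== SOURCE A (Python) =====
-- def getHindex_from_bincounts_lowerbound(bincounts, last_lowebound, binvals, last_corenumber):
--
--     if last_lowebound > last_corenumber:
--         last_lowebound = last_corenumber
--
--     numbins=len(bincounts)
--     idx=0; maxofmins=0
--     node_degree= sum(bincounts)
--
--     for c in range(numbins):
--         if bincounts[c]>0:
--             d_minus_i_plus_1_end= node_degree - (idx+1) + 1 # 2 - 2 +2 = 2
--             idx+= bincounts[c]
--             d_minus_i_plus_1_start = node_degree - idx + 1 # 2 - 2 +1 = 1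
--             for r in range(int(d_minus_i_plus_1_start), int(d_minus_i_plus_1_end+1)):
--                 d_minus_i_plus_1 = r
--                 if maxofmins < min(d_minus_i_plus_1, binvals[c]):
--                     maxofmins = min(d_minus_i_plus_1, binvals[c])
--
--     if maxofmins > last_corenumber:
--         maxofmins = last_corenumber
--     else:
--         maxofmins = max(maxofmins, last_lowebound)
--     return maxofmins
-- ===== SOURCE B (Python) =====
-- def getHindex_from_bincounts_lowerbound(bincounts, last_lowebound, binvals, last_corenumber):
--     # Inner min-loop of A is monotone in r, so its effect is just min(remaining, binvals[c])
--     # at the range's right endpoint: one O(numbins) pass, no inner loop.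
--     lb = min(last_lowebound, last_corenumber)
--     remaining = sum(bincounts)
--     best = 0
--     for cnt, val in zip(bincounts, binvals):
--         if cnt > 0:
--             best = max(best, min(remaining, val))
--             remaining -= cnt
--     return last_corenumber if best > last_corenumber else max(best, lb)
-- ===== Notes on version B (the rewrite author's own statement) =====
-- stated objective: faster
-- what changed: A's inner loop over the whole range [node_degree-idx', node_degree-idx] of candidate values is replaced by its maximum at the right endpoint (min is monotone in r), giving a single O(numbins) pass over zip(bincounts, binvals) with a running 'remaining' counter.
import Mathlib
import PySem

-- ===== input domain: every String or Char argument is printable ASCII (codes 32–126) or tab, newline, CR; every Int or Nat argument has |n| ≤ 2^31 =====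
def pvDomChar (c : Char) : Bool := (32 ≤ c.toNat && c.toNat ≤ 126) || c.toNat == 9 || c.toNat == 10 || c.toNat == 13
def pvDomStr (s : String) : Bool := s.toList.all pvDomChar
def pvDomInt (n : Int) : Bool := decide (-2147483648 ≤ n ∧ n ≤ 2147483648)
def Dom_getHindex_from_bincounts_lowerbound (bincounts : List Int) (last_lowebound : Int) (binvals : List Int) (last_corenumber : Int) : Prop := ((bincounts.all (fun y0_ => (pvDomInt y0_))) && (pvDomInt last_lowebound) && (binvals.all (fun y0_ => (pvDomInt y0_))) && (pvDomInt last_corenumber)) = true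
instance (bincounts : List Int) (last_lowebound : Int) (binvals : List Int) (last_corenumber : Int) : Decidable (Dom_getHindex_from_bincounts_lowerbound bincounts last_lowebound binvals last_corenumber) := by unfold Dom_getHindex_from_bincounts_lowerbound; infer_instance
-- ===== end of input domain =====

-- B replaces A's inner monotone min-loop by its value at the range's right endpoint: one O(numbins) pass (faster).

-- ===== PORT A =====
def getHindex_from_bincounts_lowerbound (bincounts : List Int) (last_lowebound : Int) (binvals : List Int) (last_corenumber : Int) : Int :=
  let last_lowebound := if last_lowebound > last_corenumber then last_corenumber else last_lowebound
  let numbins : Int := (bincounts.length : Int)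
  let node_degree : Int := bincounts.sum
  let st : Int × Int :=
    (PySem.List.pyRange 0 numbins 1).foldl
      (fun (s : Int × Int) (c : Int) =>
        if PySem.List.pyGetD bincounts c 0 > 0 then
          let d_end := node_degree - (s.1 + 1) + 1
          let idx := s.1 + PySem.List.pyGetD bincounts c 0
          let d_start := node_degree - idx + 1
          (idx,
            (PySem.List.pyRange d_start (d_end + 1) 1).foldl
              (fun m r =>
                if m < min r (PySem.List.pyGetD binvals c 0) then min r (PySem.List.pyGetD binvals c 0) else m)
              s.2)
        else s)
      (0, 0)
  let maxofmins := st.2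
  if maxofmins > last_corenumber then last_corenumber else max maxofmins last_lowebound

-- ===== PORT B =====
def getHindex_from_bincounts_lowerbound_alt (bincounts : List Int) (last_lowebound : Int) (binvals : List Int) (last_corenumber : Int) : Int :=
  let lb := min last_lowebound last_corenumber
  let st : Int × Int :=
    (bincounts.zip binvals).foldl
      (fun (s : Int × Int) (p : Int × Int) =>
        if p.1 > 0 then (s.1 - p.1, max s.2 (min s.1 p.2)) else s)
      (bincounts.sum, 0)
  if st.2 > last_corenumber then last_corenumber else max st.2 lb

-- ===== PRECONDITION & SPEC =====
-- Pre_ excludes exactly the inputs where A raises IndexError: a positive bincounts[c] whose c has no binvals[c].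
def Pre_getHindex_from_bincounts_lowerbound (bincounts : List Int) (last_lowebound : Int) (binvals : List Int) (last_corenumber : Int) : Prop :=
  ∀ c, c < bincounts.length → 0 < bincounts.getD c 0 → c < binvals.length
instance (bincounts : List Int) (last_lowebound : Int) (binvals : List Int) (last_corenumber : Int) : Decidable (Pre_getHindex_from_bincounts_lowerbound bincounts last_lowebound binvals last_corenumber) := by unfold Pre_getHindex_from_bincounts_lowerbound; infer_instance

def pvWitness_getHindex_from_bincounts_lowerbound : List Int × Int × List Int × Int := ([1, 2], 0, [3, 4], 5)

def Spec_getHindex_from_bincounts_lowerbound (bincounts : List Int) (last_lowebound : Int) (binvals : List Int) (last_corenumber : Int) (out : Int) : Prop := out = getHindex_from_bincounts_lowerbound_alt bincounts last_lowebound binvals last_corenumber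
instance (bincounts : List Int) (last_lowebound : Int) (binvals : List Int) (last_corenumber : Int) (out : Int) : Decidable (Spec_getHindex_from_bincounts_lowerbound bincounts last_lowebound binvals last_corenumber out) := by unfold Spec_getHindex_from_bincounts_lowerbound; infer_instance

-- ===== CLAIM (what is proved, stated in full; the proofs are below) =====
def Claim_equal_getHindex_from_bincounts_lowerbound : Prop := ∀ (bincounts : List Int) (last_lowebound : Int) (binvals : List Int) (last_corenumber : Int), Dom_getHindex_from_bincounts_lowerbound bincounts last_lowebound binvals last_corenumber → Pre_getHindex_from_bincounts_lowerbound bincounts last_lowebound binvals last_corenumber → Spec_getHindex_from_bincounts_lowerbound bincounts last_lowebound binvals last_corenumber (getHindex_from_bincounts_lowerbound bincounts last_lowebound binvals last_corenumber)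

-- ===== LEMMAS AND PROOFS =====

-- A's inner loop: fold of "take the max with min r bv" over an ascending nonempty range = max with the right endpoint.
lemma inner_fold_eq_max (bv : Int) : ∀ (n : Nat) (a b m : Int), a ≤ b → (b - a).toNat = n →
    (PySem.List.pyRange a (b + 1) 1).foldl
      (fun m r => if m < min r bv then min r bv else m) m = max m (min b bv) := by
  intro n
  induction n with
  | zero =>
    intro a b m hab h0
    have hba : a = b := by omega
    subst hba
    rw [PySem.List.pyRange_one_singleton]
    simp only [List.foldl_cons, List.foldl_nil]
    split_ifs <;> omega
  | succ k ih =>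
    intro a b m hab hn
    have hlt : a < b + 1 := by omega
    rw [PySem.List.pyRange_one_cons hlt]
    simp only [List.foldl_cons]
    have := ih (a + 1) b (if m < min a bv then min a bv else m) (by omega) (by omega)
    rw [this]
    split_ifs <;> omega

-- The bridge: A's index fold from position j equals B's zip fold over the dropped suffixes,
-- with B's first component tracking nd - idx.
lemma bridge (BC BV : List Int) (nd : Int)
    (hPre : ∀ c, c < BC.length → 0 < BC.getD c 0 → c < BV.length) :
    ∀ (n j : Nat), j + n = BC.length → ∀ (idx m : Int),
    ((BC.drop j).zip (BV.drop j)).foldl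
        (fun (s : Int × Int) (p : Int × Int) =>
          if p.1 > 0 then (s.1 - p.1, max s.2 (min s.1 p.2)) else s)
        (nd - idx, m)
    = (fun r : Int × Int => (nd - r.1, r.2))
        ((PySem.List.pyRange (j : Int) (BC.length : Int) 1).foldl
          (fun (s : Int × Int) (c : Int) =>
            if PySem.List.pyGetD BC c 0 > 0 then
              let d_end := nd - (s.1 + 1) + 1
              let idx := s.1 + PySem.List.pyGetD BC c 0
              let d_start := nd - idx + 1
              (idx,
                (PySem.List.pyRange d_start (d_end + 1) 1).foldl
                  (fun m r =>
                    if m < min r (PySem.List.pyGetD BV c 0) then min r (PySem.List.pyGetD BV c 0) else m)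
                  s.2)
            else s)
          (idx, m)) := by
  intro n
  induction n with
  | zero =>
    intro j hj idx m
    have h1 : BC.drop j = [] := List.drop_eq_nil_of_le (by omega)
    have h2 : PySem.List.pyRange (j : Int) (BC.length : Int) 1 = [] :=
      PySem.List.pyRange_one_eq_nil (by exact_mod_cast Nat.le_of_eq hj.symm)
    rw [h1, h2]
    simp
  | succ k ih =>
    intro j hj idx m
    have hjlt : j < BC.length := by omega
    have hcons : PySem.List.pyRange (j : Int) (BC.length : Int) 1
        = (j : Int) :: PySem.List.pyRange ((j : Int) + 1) (BC.length : Int) 1 :=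
      PySem.List.pyRange_one_cons (by exact_mod_cast hjlt)
    have hgetBC : PySem.List.pyGetD BC (j : Int) 0 = BC[j] := by
      rw [PySem.List.pyGetD_natCast]; exact List.getD_eq_getElem BC 0 hjlt
    have hdropBC : BC.drop j = BC[j] :: BC.drop (j + 1) := List.drop_eq_getElem_cons hjlt
    rw [hcons]
    simp only [List.foldl_cons]
    by_cases hpos : 0 < BC[j]
    · -- positive bin: both sides take a real step
      have hjBV : j < BV.length := hPre j hjlt (by rwa [List.getD_eq_getElem BC 0 hjlt])
      have hdropBV : BV.drop j = BV[j] :: BV.drop (j + 1) := List.drop_eq_getElem_cons hjBV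
      have hgetBV : PySem.List.pyGetD BV (j : Int) 0 = BV[j] := by
        rw [PySem.List.pyGetD_natCast]; exact List.getD_eq_getElem BV 0 hjBV
      rw [hdropBC, hdropBV]
      simp only [List.zip_cons_cons, List.foldl_cons, hgetBC, hgetBV]
      rw [if_pos hpos, if_pos hpos]
      -- evaluate A's inner loop
      have hinner :
          (PySem.List.pyRange (nd - (idx + BC[j]) + 1) ((nd - (idx + 1) + 1) + 1) 1).foldl
            (fun m r => if m < min r BV[j] then min r BV[j] else m) m
          = max m (min (nd - idx) BV[j]) := by
        have h := inner_fold_eq_max BV[j] ((nd - idx) - (nd - (idx + BC[j]) + 1)).toNat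
          (nd - (idx + BC[j]) + 1) (nd - idx) m (by omega) rfl
        have he : nd - (idx + 1) + 1 = nd - idx := by ring
        rw [he]
        exact h
      rw [hinner]
      have := ih (j + 1) (by omega) (idx + BC[j]) (max m (min (nd - idx) BV[j]))
      push_cast at this ⊢
      rw [show nd - idx - BC[j] = nd - (idx + BC[j]) by ring]
      rw [show max m (min (nd - idx) BV[j]) = max (min (nd - idx) BV[j]) m by omega] at this ⊢
      exact this
    · -- nonpositive bin: both sides skip
      rw [hgetBC, if_neg (by omega)]
      have ihj := ih (j + 1) (by omega) idx m
      push_cast at ihj ⊢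
      by_cases hjBV : j < BV.length
      · have hdropBV : BV.drop j = BV[j] :: BV.drop (j + 1) := List.drop_eq_getElem_cons hjBV
        rw [hdropBC, hdropBV]
        simp only [List.zip_cons_cons, List.foldl_cons]
        rw [if_neg (by omega)]
        exact ihj
      · have h1 : BV.drop j = [] := List.drop_eq_nil_of_le (by omega)
        have h2 : BV.drop (j + 1) = [] := List.drop_eq_nil_of_le (by omega)
        rw [h1] at *
        rw [h2] at ihj
        simpa using ihj

-- ===== VERDICT (by name: the statement is the Claim_ definition above) =====
theorem getHindex_from_bincounts_lowerbound_spec : Claim_equal_getHindex_from_bincounts_lowerbound := by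
  intro bincounts last_lowebound binvals last_corenumber _hDom hPre
  unfold Spec_getHindex_from_bincounts_lowerbound
  unfold getHindex_from_bincounts_lowerbound getHindex_from_bincounts_lowerbound_alt
  simp only
  have hb := bridge bincounts binvals bincounts.sum hPre bincounts.length 0 (by omega) 0 0
  simp only [Nat.cast_zero, List.drop_zero, sub_zero] at hb
  have hsnd : ((bincounts.zip binvals).foldl
      (fun (s : Int × Int) (p : Int × Int) =>
        if p.1 > 0 then (s.1 - p.1, max s.2 (min s.1 p.2)) else s)
      (bincounts.sum, 0)).2
      = ((PySem.List.pyRange 0 (bincounts.length : Int) 1).foldl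
          (fun (s : Int × Int) (c : Int) =>
            if PySem.List.pyGetD bincounts c 0 > 0 then
              let d_end := bincounts.sum - (s.1 + 1) + 1
              let idx := s.1 + PySem.List.pyGetD bincounts c 0
              let d_start := bincounts.sum - idx + 1
              (idx,
                (PySem.List.pyRange d_start (d_end + 1) 1).foldl
                  (fun m r =>
                    if m < min r (PySem.List.pyGetD binvals c 0) then min r (PySem.List.pyGetD binvals c 0) else m)
                  s.2)
            else s)
          ((0 : Int), (0 : Int))).2 := by
    rw [hb]
  rw [← hsnd]
  split_ifs <;> omega
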